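-- pv_equiv track=rewrite | github.com/stlyash/SentimentAnalysis | analyze.py | get_CV_sequence
-- ===== SOURCE A (Python) =====
-- def get_CV_sequence(word):
--     vowels = ["a","e","i","o","u"]
--     clusters = ["ph","ng","ck"]
--     prev_cons = None
--     cv_seq = ""
--     for char in word:
--         if prev_cons and char in vowels:
--             cv_seq += "CV"
--             prev_cons = None
--         elif char in vowels:
--             cv_seq += "V"
--         elif prev_cons and prev_cons+char in clusters:
--             cv_seq += "C"
--             prev_cons = None
--         elif prev_cons:
--             cv_seq += "C"
--             prev_cons = char
--         else:
--             prev_cons = char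
--
--     if prev_cons:
--         cv_seq += "C"
--
--     return cv_seq
-- ===== SOURCE B (Python) =====
-- def get_CV_sequence(word):
--     clusters = ("ph", "ng", "ck")
--     collapsed = []
--     i = 0
--     n = len(word)
--     while i < n:
--         if word[i:i+2] in clusters:
--             collapsed.append("C")
--             i += 2
--         else:
--             collapsed.append(word[i])
--             i += 1
--     return "".join("V" if c in "aeiou" else "C" for c in collapsed)
-- ===== Notes on version B (the rewrite author's own statement) =====
-- stated objective: simpler
-- what changed: A's single stateful pass with a pending-consonant flag is replaced by two simple passes: greedily collapse the clusters ph/ng/ck left-to-right, then map each character to its vowel/consonant mark.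
import Mathlib
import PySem

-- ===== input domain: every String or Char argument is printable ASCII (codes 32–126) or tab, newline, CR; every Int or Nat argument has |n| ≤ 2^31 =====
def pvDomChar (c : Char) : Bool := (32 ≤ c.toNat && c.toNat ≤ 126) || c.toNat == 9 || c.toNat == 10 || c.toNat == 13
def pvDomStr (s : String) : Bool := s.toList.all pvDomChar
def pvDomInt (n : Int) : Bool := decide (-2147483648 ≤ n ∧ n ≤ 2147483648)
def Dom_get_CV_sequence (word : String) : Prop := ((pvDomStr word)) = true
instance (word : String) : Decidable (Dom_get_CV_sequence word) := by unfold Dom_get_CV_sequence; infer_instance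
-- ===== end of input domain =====

-- B replaces A's single stateful pass (pending-consonant flag) by two passes: greedy
-- left-to-right collapse of the clusters ph/ng/ck to one consonant, then a plain map
-- of each remaining character to 'V'/'C' (objective: simpler).

def pvVowels : List Char := ['a', 'e', 'i', 'o', 'u']
def pvClusters : List (Char × Char) := [('p', 'h'), ('n', 'g'), ('c', 'k')]

-- ===== PORT A =====
-- the for-loop over `word` with state (prev_cons, cv_seq); emitted text is built in front
def pvGoA : Option Char → List Char → List Char
  | prev, [] => if prev.isSome then ['C'] else []
  | some p, c :: rest =>
      if c ∈ pvVowels then 'C' :: 'V' :: pvGoA none rest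
      else if (p, c) ∈ pvClusters then 'C' :: pvGoA none rest
      else 'C' :: pvGoA (some c) rest
  | none, c :: rest =>
      if c ∈ pvVowels then 'V' :: pvGoA none rest
      else pvGoA (some c) rest

def get_CV_sequence (word : String) : String :=
  String.mk (pvGoA none word.toList)

-- ===== PORT B =====
-- pass 1: greedy left-to-right collapse of cluster pairs to the single consonant 'C'
def pvCollapse : List Char → List Char
  | [] => []
  | [c] => [c]
  | a :: b :: rest =>
      if (a, b) ∈ pvClusters then 'C' :: pvCollapse rest
      else a :: pvCollapse (b :: rest)

-- pass 2: map each character to 'V'/'C'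
def pvCV (c : Char) : Char := if c ∈ pvVowels then 'V' else 'C'

def get_CV_sequence_alt (word : String) : String :=
  String.mk ((pvCollapse word.toList).map pvCV)

-- ===== PRECONDITION & SPEC =====
def Spec_get_CV_sequence (word : String) (out : String) : Prop := out = get_CV_sequence_alt word
instance (word : String) (out : String) : Decidable (Spec_get_CV_sequence word out) := by unfold Spec_get_CV_sequence; infer_instance

-- ===== CLAIM (what is proved, stated in full; the proofs are below) =====
def Claim_equal_get_CV_sequence : Prop := ∀ (word : String), Dom_get_CV_sequence word → Spec_get_CV_sequence word (get_CV_sequence word)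

-- ===== LEMMAS AND PROOFS =====

-- no cluster starts with a vowel
lemma pv_vowel_not_cluster_fst {c d : Char} (h : c ∈ pvVowels) : (c, d) ∉ pvClusters := by
  intro hc
  simp [pvVowels] at h
  simp [pvClusters, Prod.ext_iff] at hc
  rcases h with h|h|h|h|h <;> subst h <;> simp_all

-- no cluster ends with a vowel
lemma pv_cluster_snd_not_vowel {p c : Char} (h : (p, c) ∈ pvClusters) : c ∉ pvVowels := by
  simp [pvClusters, Prod.ext_iff] at h
  rcases h with ⟨_, h⟩|⟨_, h⟩|⟨_, h⟩ <;> subst h <;> decide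

lemma pv_collapse_vowel_cons {c : Char} (hv : c ∈ pvVowels) (l : List Char) :
    pvCollapse (c :: l) = c :: pvCollapse l := by
  cases l with
  | nil => simp [pvCollapse]
  | cons d l' => simp [pvCollapse, pv_vowel_not_cluster_fst hv]

lemma pv_key : ∀ l : List Char,
    pvGoA none l = (pvCollapse l).map pvCV ∧
    ∀ p, p ∉ pvVowels → pvGoA (some p) l = (pvCollapse (p :: l)).map pvCV := by
  intro l
  induction l with
  | nil =>
      refine ⟨rfl, fun p hp => ?_⟩
      simp [pvGoA, pvCollapse, pvCV, hp]
  | cons c rest ih =>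
      obtain ⟨ih1, ih2⟩ := ih
      constructor
      · by_cases hv : c ∈ pvVowels
        · rw [pv_collapse_vowel_cons hv]
          simp [pvGoA, hv, ih1, pvCV]
        · simpa [pvGoA, hv] using ih2 c hv
      · intro p hp
        by_cases hv : c ∈ pvVowels
        · have hnc : (p, c) ∉ pvClusters := fun h => pv_cluster_snd_not_vowel h hv
          have : pvCollapse (p :: c :: rest) = p :: c :: pvCollapse rest := by
            simp [pvCollapse, hnc, pv_collapse_vowel_cons hv]
          rw [this]
          simp [pvGoA, hv, ih1, pvCV, hp]
        · by_cases hcl : (p, c) ∈ pvClusters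
          · have : pvCollapse (p :: c :: rest) = 'C' :: pvCollapse rest := by
              simp [pvCollapse, hcl]
            rw [this]
            simp [pvGoA, hv, hcl, ih1, pvCV]
            decide
          · have : pvCollapse (p :: c :: rest) = p :: pvCollapse (c :: rest) := by
              simp [pvCollapse, hcl]
            rw [this]
            simp [pvGoA, hv, hcl, ih2 c hv, pvCV, hp]

-- ===== VERDICT (by name: the statement is the Claim_ definition above) =====
theorem get_CV_sequence_spec : Claim_equal_get_CV_sequence := by
  intro word _
  unfold Spec_get_CV_sequence get_CV_sequence get_CV_sequence_alt
  exact congrArg String.mk (pv_key word.toList).1
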